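-- pv_equiv track=rewrite | github.com/harry7557558/Shadertoy | glsl2cpp/glsl2cpp_h_generator.py | generate_vec_int_constructor
-- ===== SOURCE A (Python) =====
-- def generate_vec_int_constructor(name: str, n: int):
--     assert 2 <= n <= 4
--     comps = ['x', 'y', 'z', 'w']
--     lines = []
--     for i in range(2**n):
--         params = []
--         inits = []
--         for b in range(n):
--             typename = "int" if (i >> b) & 1 == 1 else "float"
--             compname = comps[b]
--             params.append(f"const {typename} &{compname}")
--             inits.append(f"{compname}((float){compname})")
--         s = f"explicit {name}({', '.join(params)}) :{', '.join(inits)} {{}}"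
--         lines.append(s)
--     return '\n'.join(lines)
-- ===== SOURCE B (Python) =====
-- def generate_vec_int_constructor(name: str, n: int):
--     assert 2 <= n <= 4
--     comps = ['x', 'y', 'z', 'w'][:n]
--     # the initializer list is the same for every overload: build it once
--     init = ', '.join(f"{c}((float){c})" for c in comps)
--
--     # all length-k type tuples, component x toggling fastest (top bit slowest)
--     def combos(k):
--         if k == 0:
--             return [[]]
--         return [r + [t] for t in ('float', 'int') for r in combos(k - 1)]
--
--     return '\n'.join(
--         f"explicit {name}({', '.join(f'const {t} &{c}' for t, c in zip(ts, comps))}) :{init} {{}}"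
--         for ts in combos(n))
-- ===== Notes on version B (the rewrite author's own statement) =====
-- stated objective: idiomatic
-- what changed: B builds the constant initializer string once and enumerates the float/int type tuples by structural recursion (x toggling fastest) instead of decoding bits of an integer counter inside a nested loop that rebuilds the initializer list for every overload.
import Mathlib
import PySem

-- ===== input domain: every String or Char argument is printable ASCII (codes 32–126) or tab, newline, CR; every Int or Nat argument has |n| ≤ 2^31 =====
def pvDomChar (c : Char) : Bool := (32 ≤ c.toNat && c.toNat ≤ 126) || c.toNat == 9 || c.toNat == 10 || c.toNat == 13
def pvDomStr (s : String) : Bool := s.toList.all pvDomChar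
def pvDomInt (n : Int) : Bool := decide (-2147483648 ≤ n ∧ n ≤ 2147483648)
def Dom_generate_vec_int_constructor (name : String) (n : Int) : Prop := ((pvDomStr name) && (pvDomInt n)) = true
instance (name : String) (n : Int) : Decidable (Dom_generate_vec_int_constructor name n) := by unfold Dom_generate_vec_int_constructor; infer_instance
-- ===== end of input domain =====

-- B builds the shared initializer string once and enumerates the float/int type tuples by
-- structural recursion (x toggling fastest) instead of bit-decoding an integer counter; same cost.

-- ===== PORT A =====
def generate_vec_int_constructor (name : String) (n : Int) : String :=
  let comps := ["x", "y", "z", "w"]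
  let lines := (PySem.List.pyRange 0 ((2 : Int) ^ n.toNat) 1).foldl (fun lines i =>
    let pr := (PySem.List.pyRange 0 n 1).foldl (fun (pr : List String × List String) b =>
      -- (i >> b) & 1 == 1 : here i ≥ 0 and b ≥ 0, so the Nat shift is exact
      let typename := if (i.toNat >>> b.toNat) % 2 == 1 then "int" else "float"
      let compname := PySem.List.pyGetD comps b ""   -- comps[b]; b < n ≤ 4 under Pre_, in range
      (pr.1 ++ ["const " ++ typename ++ " &" ++ compname],
       pr.2 ++ [compname ++ "((float)" ++ compname ++ ")"])) ([], [])
    lines ++ ["explicit " ++ name ++ "(" ++ PySem.Str.join ", " pr.1 ++ ") :" ++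
              PySem.Str.join ", " pr.2 ++ " {}"]) []
  PySem.Str.join "\n" lines

-- ===== PORT B =====
-- combos(k) from Source B: all length-k type lists, first component toggling fastest
def pvCombos : Nat → List (List String)
  | 0 => [[]]
  | k + 1 => ["float", "int"].flatMap (fun t => (pvCombos k).map (fun r => r ++ [t]))

def generate_vec_int_constructor_alt (name : String) (n : Int) : String :=
  let comps := PySem.List.slice ["x", "y", "z", "w"] none (some n)   -- [:n]
  let init := PySem.Str.join ", " (comps.map (fun c => c ++ "((float)" ++ c ++ ")"))
  PySem.Str.join "\n" ((pvCombos n.toNat).map (fun ts =>   -- combos(n); n ≥ 0 under Pre_, exact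
    "explicit " ++ name ++ "(" ++
      PySem.Str.join ", " ((ts.zip comps).map (fun tc => "const " ++ tc.1 ++ " &" ++ tc.2)) ++
      ") :" ++ init ++ " {}"))

-- ===== PRECONDITION & SPEC =====
-- Pre_: exactly A's `assert 2 <= n <= 4`; outside it A raises AssertionError.
def Pre_generate_vec_int_constructor (name : String) (n : Int) : Prop := 2 ≤ n ∧ n ≤ 4
instance (name : String) (n : Int) : Decidable (Pre_generate_vec_int_constructor name n) := by
  unfold Pre_generate_vec_int_constructor; infer_instance
def pvWitness_generate_vec_int_constructor : String × Int := ("vec3", 3)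

def Spec_generate_vec_int_constructor (name : String) (n : Int) (out : String) : Prop := out = generate_vec_int_constructor_alt name n
instance (name : String) (n : Int) (out : String) : Decidable (Spec_generate_vec_int_constructor name n out) := by unfold Spec_generate_vec_int_constructor; infer_instance

-- ===== CLAIM (what is proved, stated in full; the proofs are below) =====
def Claim_equal_generate_vec_int_constructor : Prop := ∀ (name : String) (n : Int), Dom_generate_vec_int_constructor name n → Pre_generate_vec_int_constructor name n → Spec_generate_vec_int_constructor name n (generate_vec_int_constructor name n)

-- ===== LEMMAS AND PROOFS =====

-- ===== VERDICT (by name: the statement is the Claim_ definition above) =====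
theorem generate_vec_int_constructor_spec : Claim_equal_generate_vec_int_constructor := by
  intro name n _ hpre
  obtain ⟨h2, h4⟩ := hpre
  unfold Spec_generate_vec_int_constructor
  interval_cases n <;> rfl
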